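-- pv_equiv track=rewrite | github.com/Soho36/1500_count | Monte_Carlo_survivability_test.py | simulate_account
-- ===== SOURCE A (Python) =====
-- TRAILING_STOP = -750    # trailing stop in dollars must be negative
--
-- def simulate_account(trades, buffer):
--     equity = 0
--     max_equity = 0
--
--     for r in trades:
--         equity += r
--         max_equity = max(max_equity, equity)
--
--         if max_equity < buffer:
--             trailing_level = TRAILING_STOP + max_equity
--         else:
--             trailing_level = TRAILING_STOP + buffer
--
--         if equity <= trailing_level:
--             return False
--
--     return True
-- ===== SOURCE B (Python) =====
-- TRAILING_STOP = -750    # trailing stop in dollars must be negative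
--
-- def simulate_account(trades, buffer):
--     # Precompute running equity (prefix sums) and running capped max (floored at 0),
--     # then decide survival with a single predicate over the zipped tables.
--     equities = []
--     e = 0
--     for r in trades:
--         e += r
--         equities.append(e)
--     max_eqs = []
--     m = 0
--     for e in equities:
--         m = max(m, e)
--         max_eqs.append(m)
--     return all(e > TRAILING_STOP + min(m, buffer) for e, m in zip(equities, max_eqs))
-- ===== Notes on version B (the rewrite author's own statement) =====
-- stated objective: alternative
-- what changed: Replaces A's single mutating loop with early return by two precomputed tables (prefix-sum equities and running max floored at 0) and one all() predicate over their zip, with min(m, buffer) replacing the two-branch trailing level.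
import Mathlib
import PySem

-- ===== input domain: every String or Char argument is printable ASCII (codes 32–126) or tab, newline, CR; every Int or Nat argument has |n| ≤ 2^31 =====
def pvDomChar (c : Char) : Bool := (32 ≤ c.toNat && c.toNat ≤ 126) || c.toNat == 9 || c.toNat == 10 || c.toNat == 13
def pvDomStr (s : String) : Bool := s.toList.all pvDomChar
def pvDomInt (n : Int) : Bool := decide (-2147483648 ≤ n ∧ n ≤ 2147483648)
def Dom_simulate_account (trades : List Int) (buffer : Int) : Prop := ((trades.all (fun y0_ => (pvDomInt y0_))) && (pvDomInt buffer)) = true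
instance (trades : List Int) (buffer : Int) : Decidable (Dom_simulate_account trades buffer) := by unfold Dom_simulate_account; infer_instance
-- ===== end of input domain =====

-- B recomputes A's survival check via precomputed prefix-sum and running-max tables plus one all() predicate (alternative decomposition, same cost).


-- ===== PORT A =====
-- A's loop: state (equity, max_equity), early return False when equity hits the trailing level.
def simulateLoopA (buffer : Int) : List Int → Int → Int → Bool
  | [], _, _ => true
  | r :: rest, equity, max_equity =>
    let equity' := equity + r
    let max_equity' := max max_equity equity'
    let trailing_level := if max_equity' < buffer then (-750) + max_equity' else (-750) + buffer
    if equity' ≤ trailing_level then false else simulateLoopA buffer rest equity' max_equity'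

def simulate_account (trades : List Int) (buffer : Int) : Bool :=
  simulateLoopA buffer trades 0 0

-- ===== PORT B =====
-- running equity table (prefix sums, seeded with current equity e)
def eqTable : Int → List Int → List Int
  | _, [] => []
  | e, r :: rest => (e + r) :: eqTable (e + r) rest

-- running max table over an equity list, seeded with current max m
def mxTable : Int → List Int → List Int
  | _, [] => []
  | m, e :: rest => (max m e) :: mxTable (max m e) rest

def simulate_account_alt (trades : List Int) (buffer : Int) : Bool :=
  let equities := eqTable 0 trades
  let max_eqs := mxTable 0 equities
  (equities.zip max_eqs).all (fun p => decide (p.1 > (-750) + min p.2 buffer))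

-- ===== PRECONDITION & SPEC =====
def Spec_simulate_account (trades : List Int) (buffer : Int) (out : Bool) : Prop := out = simulate_account_alt trades buffer
instance (trades : List Int) (buffer : Int) (out : Bool) : Decidable (Spec_simulate_account trades buffer out) := by unfold Spec_simulate_account; infer_instance

-- ===== CLAIM (what is proved, stated in full; the proofs are below) =====
def Claim_equal_simulate_account : Prop := ∀ (trades : List Int) (buffer : Int), Dom_simulate_account trades buffer → Spec_simulate_account trades buffer (simulate_account trades buffer)

-- ===== LEMMAS AND PROOFS =====
-- Invariant: A's loop from state (e, m) equals B's predicate over the tables seeded with e and m.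
theorem loopA_eq_tables (buffer : Int) (trades : List Int) :
    ∀ (e m : Int),
      simulateLoopA buffer trades e m
        = ((eqTable e trades).zip (mxTable m (eqTable e trades))).all
            (fun p => decide (p.1 > (-750) + min p.2 buffer)) := by
  induction trades with
  | nil => intro e m; rfl
  | cons r rest ih =>
    intro e m
    simp only [simulateLoopA, eqTable, mxTable, List.zip_cons_cons, List.all_cons]
    rw [ih (e + r) (max m (e + r))]
    by_cases h : max m (e + r) < buffer
    · simp only [if_pos h]
      by_cases h2 : e + r ≤ (-750) + max m (e + r)
      · simp only [if_pos h2]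
        have : ¬ (e + r > (-750) + min (max m (e + r)) buffer) := by omega
        simp [this]
      · simp only [if_neg h2]
        have : (e + r > (-750) + min (max m (e + r)) buffer) := by omega
        simp [this]
    · simp only [if_neg h]
      by_cases h2 : e + r ≤ (-750) + buffer
      · simp only [if_pos h2]
        have : ¬ (e + r > (-750) + min (max m (e + r)) buffer) := by omega
        simp [this]
      · simp only [if_neg h2]
        have : (e + r > (-750) + min (max m (e + r)) buffer) := by omega
        simp [this]

-- ===== VERDICT (by name: the statement is the Claim_ definition above) =====
theorem simulate_account_spec : Claim_equal_simulate_account := by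
  intro trades buffer _
  unfold Spec_simulate_account simulate_account simulate_account_alt
  exact loopA_eq_tables buffer trades 0 0
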